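-- pv_equiv track=rewrite | github.com/pypi-data/pypi-mirror-404 | packages/flexllm/flexllm-0.5.5.tar.gz/flexllm-0.5.5/flexllm/chat_web.py | _flush_safe
-- ===== SOURCE A (Python) =====
-- def _flush_safe(buf: str, tag: str) -> tuple[str, str]:
--     """将 buffer 中安全的部分（不可能是 tag 前缀的部分）输出，保留可能的前缀。"""
--     # tag 的最大前缀长度 = len(tag) - 1
--     max_prefix = len(tag) - 1
--     if len(buf) <= max_prefix:
--         # 整个 buffer 都可能是 tag 前缀
--         for i in range(len(buf)):
--             if tag.startswith(buf[i:]):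
--                 return buf[:i], buf[i:]
--         return buf, ""
--     # 只检查末尾 max_prefix 个字符
--     safe_end = len(buf) - max_prefix
--     tail = buf[safe_end:]
--     for i in range(len(tail)):
--         if tag.startswith(tail[i:]):
--             return buf[: safe_end + i], tail[i:]
--     return buf, ""
-- ===== SOURCE B (Python) =====
-- def _flush_safe(buf: str, tag: str) -> tuple[str, str]:
--     """Single left-to-right pass over buf maintaining the set of all suffix
--     lengths that are still viable proper prefixes of tag; split at the largest."""
--     m = len(tag)
--     lens = [0]  # every l in lens: buf-so-far ends with tag[:l], l < m (or l == 0)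
--     for c in buf:
--         lens = [l + 1 for l in lens if l + 1 < m and tag[l] == c] + [0]
--     k = max(lens, default=0)
--     return buf[:len(buf) - k], buf[len(buf) - k:]
-- ===== Notes on version B (the rewrite author's own statement) =====
-- stated objective: alternative
-- what changed: A scans candidate split positions of the final buffer tail, building fresh O(n) slices of buf for startswith/return at each candidate; B instead makes a single online left-to-right pass over buf maintaining the set of all suffix lengths still viable as proper tag prefixes (extend-or-drop each length per character, re-seed 0) and slices buf once at the maximum viable length.
import Mathlib
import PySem

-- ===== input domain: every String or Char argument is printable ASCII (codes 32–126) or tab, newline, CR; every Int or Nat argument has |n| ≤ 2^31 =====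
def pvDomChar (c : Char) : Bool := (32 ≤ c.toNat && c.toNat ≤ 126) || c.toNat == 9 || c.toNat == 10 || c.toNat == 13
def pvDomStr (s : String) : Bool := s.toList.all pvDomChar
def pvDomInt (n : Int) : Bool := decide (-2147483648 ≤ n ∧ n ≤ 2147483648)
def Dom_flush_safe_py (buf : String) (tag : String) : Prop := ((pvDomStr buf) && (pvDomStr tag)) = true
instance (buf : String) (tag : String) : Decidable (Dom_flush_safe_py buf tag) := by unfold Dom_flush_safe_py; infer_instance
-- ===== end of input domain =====

-- B replaces A's end-of-buffer scan over split positions by a single online left-to-right pass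
-- over buf maintaining the set of all suffix lengths still viable as proper tag prefixes
-- (objective: alternative algorithm; similar cost).


-- ===== PORT A =====
-- 'for i in range(len(buf)): if tag.startswith(buf[i:]): return buf[:i], buf[i:]'
def flushA_short (buf tag : String) : List Int → String × String
  | [] => (buf, "")
  | i :: rest =>
    if PySem.Str.startswith tag (PySem.Str.slice buf (some i) none) then
      (PySem.Str.slice buf none (some i), PySem.Str.slice buf (some i) none)
    else flushA_short buf tag rest

-- 'for i in range(len(tail)): if tag.startswith(tail[i:]): return buf[:safe_end+i], tail[i:]'
def flushA_tail (buf tag tail : String) (safe_end : Int) : List Int → String × String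
  | [] => (buf, "")
  | i :: rest =>
    if PySem.Str.startswith tag (PySem.Str.slice tail (some i) none) then
      (PySem.Str.slice buf none (some (safe_end + i)), PySem.Str.slice tail (some i) none)
    else flushA_tail buf tag tail safe_end rest

def flush_safe_py (buf : String) (tag : String) : String × String :=
  let max_prefix : Int := PySem.Str.len tag - 1
  if PySem.Str.len buf ≤ max_prefix then
    flushA_short buf tag (PySem.List.pyRange 0 (PySem.Str.len buf) 1)
  else
    let safe_end : Int := PySem.Str.len buf - max_prefix
    let tail : String := PySem.Str.slice buf (some safe_end) none
    flushA_tail buf tag tail safe_end (PySem.List.pyRange 0 (PySem.Str.len tail) 1)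

-- ===== PORT B =====
-- 'lens = [l + 1 for l in lens if l + 1 < m and tag[l] == c] + [0]'
def flushB_step (tag : String) (m : Int) (lens : List Int) (c : Char) : List Int :=
  (lens.filter (fun l => decide (l + 1 < m) && decide (PySem.Str.pyGet? tag l = some c))).map
      (fun l => l + 1)
    ++ [0]

def flush_safe_py_alt (buf : String) (tag : String) : String × String :=
  let m : Int := PySem.Str.len tag
  let lens : List Int := buf.toList.foldl (flushB_step tag m) [0]
  let k : Int := match PySem.List.max? lens (fun x => x) with
    | some v => v
    | none => 0
  (PySem.Str.slice buf none (some (PySem.Str.len buf - k)),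
   PySem.Str.slice buf (some (PySem.Str.len buf - k)) none)

-- ===== PRECONDITION & SPEC =====
def Spec_flush_safe_py (buf : String) (tag : String) (out : String × String) : Prop := out = flush_safe_py_alt buf tag
instance (buf : String) (tag : String) (out : String × String) : Decidable (Spec_flush_safe_py buf tag out) := by unfold Spec_flush_safe_py; infer_instance

-- ===== CLAIM (what is proved, stated in full; the proofs are below) =====
def Claim_equal_flush_safe_py : Prop := ∀ (buf : String) (tag : String), Dom_flush_safe_py buf tag → Spec_flush_safe_py buf tag (flush_safe_py buf tag)

-- ===== LEMMAS AND PROOFS =====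

-- proof-side helper: the largest k' ≤ max k 0 with buf.endswith(tag[:k']) — the common
-- characterisation both ports are reduced to
def flushB_keep (buf tag : String) (n : Int) (k : Int) : Int :=
  if k ≤ 0 then 0
  else if PySem.Str.endswith buf (PySem.Str.slice tag none (some k)) then k
  else flushB_keep buf tag n (k - 1)
termination_by k.toNat
decreasing_by omega

theorem toList_slice_from (s : String) (a : Int) (h : 0 ≤ a) :
    (PySem.Str.slice s (some a) none).toList = s.toList.drop a.toNat := by
  rw [PySem.Str.toList_slice, PySem.Chars.slice_eq_listSlice, PySem.List.slice_from _ h]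

theorem toList_slice_to (s : String) (b : Int) (h : 0 ≤ b) :
    (PySem.Str.slice s none (some b)).toList = s.toList.take b.toNat := by
  rw [PySem.Str.toList_slice, PySem.Chars.slice_eq_listSlice, PySem.List.slice_to _ h]

theorem keep_nonpos (buf tag : String) (n k : Int) (h : k ≤ 0) :
    flushB_keep buf tag n k = 0 := by
  rw [flushB_keep]; simp [h]

-- startswith tag s ↔ s is the |s|-prefix of tag (unconditional)
theorem condA_iff (tag s : String) :
    PySem.Str.startswith tag s = true ↔ s.toList = tag.toList.take s.toList.length := by
  rw [PySem.Str.startswith_eq, PySem.Chars.startswith_iff, List.prefix_iff_eq_take]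

theorem str_ext {x y : String} (h : x.toList = y.toList) : x = y := String.toList_inj.mp h

theorem slice_to_full (s : String) : PySem.Str.slice s none (some (s.toList.length : Int)) = s := by
  apply str_ext
  rw [toList_slice_to _ _ (by positivity)]
  simp

theorem slice_from_full (s : String) : PySem.Str.slice s (some (s.toList.length : Int)) none = "" := by
  apply str_ext
  rw [toList_slice_from _ _ (by positivity)]
  simp

theorem short_loop (buf tag : String) (hm : buf.toList.length < tag.toList.length) :
    ∀ d : Nat, d ≤ buf.toList.length →
    flushA_short buf tag (PySem.List.pyRange ((buf.toList.length - d : Nat) : Int) ((buf.toList.length : Nat) : Int) 1)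
    = (PySem.Str.slice buf none (some ((buf.toList.length : Int) - flushB_keep buf tag (buf.toList.length : Int) (d : Int))),
       PySem.Str.slice buf (some ((buf.toList.length : Int) - flushB_keep buf tag (buf.toList.length : Int) (d : Int))) none) := by
  intro d
  induction d with
  | zero =>
    intro _
    rw [Nat.sub_zero, PySem.List.pyRange_one_eq_nil (le_refl _),
        keep_nonpos _ _ _ _ (by norm_num)]
    simp only [flushA_short, sub_zero]
    rw [slice_to_full, slice_from_full]
  | succ d ih =>
    intro hd
    have hcast : ((buf.toList.length - (d + 1) : Nat) : Int) = (buf.toList.length : Int) - ((d : Int) + 1) := by omega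
    have hlt : ((buf.toList.length - (d + 1) : Nat) : Int) < (buf.toList.length : Nat) := by omega
    rw [PySem.List.pyRange_one_cons hlt]
    simp only [flushA_short]
    -- the common condition
    have hdropLen : (buf.toList.drop (buf.toList.length - (d + 1))).length = d + 1 := by
      rw [List.length_drop]; omega
    have hA : (PySem.Str.startswith tag (PySem.Str.slice buf (some ((buf.toList.length - (d + 1) : Nat) : Int)) none) = true)
        ↔ buf.toList.drop (buf.toList.length - (d + 1)) = tag.toList.take (d + 1) := by
      rw [condA_iff, toList_slice_from _ _ (by positivity), Int.toNat_natCast, hdropLen]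
    have hB : (PySem.Str.endswith buf (PySem.Str.slice tag none (some (Nat.cast (d + 1) : Int))) = true)
        ↔ buf.toList.drop (buf.toList.length - (d + 1)) = tag.toList.take (d + 1) := by
      have h2 : ((Nat.cast (d + 1) : Int)).toNat = d + 1 := by omega
      rw [PySem.Str.endswith_eq, PySem.Str.toList_slice, PySem.Chars.slice_eq_listSlice,
          PySem.List.slice_to _ (by omega), h2, PySem.Chars.endswith_iff,
          List.suffix_iff_eq_drop, List.length_take, Nat.min_eq_left (by omega)]
      exact eq_comm
    have hB0 : ¬ (Nat.cast (d + 1) : Int) ≤ 0 := by omega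
    have hcast' : ((buf.toList.length - (d + 1) : Nat) : Int) = (buf.toList.length : Int) - (Nat.cast (d + 1) : Int) := by omega
    by_cases hP : buf.toList.drop (buf.toList.length - (d + 1)) = tag.toList.take (d + 1)
    · rw [if_pos (hA.mpr hP), flushB_keep, if_neg hB0, if_pos (hB.mpr hP), hcast']
    · rw [if_neg (by rw [hA]; exact hP), flushB_keep, if_neg hB0,
          if_neg (by rw [hB]; exact hP)]
      have hstep : ((buf.toList.length - (d + 1) : Nat) : Int) + 1 = ((buf.toList.length - d : Nat) : Int) := by omega
      have hk : (Nat.cast (d + 1) : Int) - 1 = ((d : Nat) : Int) := by omega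
      rw [hstep, hk]
      exact ih (by omega)

set_option maxHeartbeats 2000000 in
theorem long_loop (buf tag : String) (hm1 : 1 ≤ tag.toList.length) (hmn : tag.toList.length ≤ buf.toList.length) :
    ∀ d : Nat, d ≤ tag.toList.length - 1 →
    flushA_tail buf tag
        (PySem.Str.slice buf (some ((buf.toList.length : Int) - ((tag.toList.length : Int) - 1))) none)
        ((buf.toList.length : Int) - ((tag.toList.length : Int) - 1))
        (PySem.List.pyRange ((tag.toList.length - 1 - d : Nat) : Int) ((tag.toList.length - 1 : Nat) : Int) 1)
    = (PySem.Str.slice buf none (some ((buf.toList.length : Int) - flushB_keep buf tag (buf.toList.length : Int) (d : Int))),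
       PySem.Str.slice buf (some ((buf.toList.length : Int) - flushB_keep buf tag (buf.toList.length : Int) (d : Int))) none) := by
  have hse : (0 : Int) ≤ (buf.toList.length : Int) - ((tag.toList.length : Int) - 1) := by omega
  have htail : (PySem.Str.slice buf (some ((buf.toList.length : Int) - ((tag.toList.length : Int) - 1))) none).toList
      = buf.toList.drop (buf.toList.length - (tag.toList.length - 1)) := by
    rw [toList_slice_from _ _ hse]
    congr 1
    omega
  intro d
  induction d with
  | zero =>
    intro _
    rw [Nat.sub_zero, PySem.List.pyRange_one_eq_nil (le_refl _),
        keep_nonpos _ _ _ _ (by norm_num)]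
    simp only [flushA_tail, sub_zero]
    rw [slice_to_full, slice_from_full]
  | succ d ih =>
    intro hd
    have hlt : ((tag.toList.length - 1 - (d + 1) : Nat) : Int) < ((tag.toList.length - 1 : Nat) : Int) := by omega
    rw [PySem.List.pyRange_one_cons hlt]
    simp only [flushA_tail]
    have hdrop2 : (PySem.Str.slice buf (some ((buf.toList.length : Int) - ((tag.toList.length : Int) - 1))) none).toList.drop (tag.toList.length - 1 - (d + 1))
        = buf.toList.drop (buf.toList.length - (d + 1)) := by
      rw [htail, List.drop_drop]
      congr 1
      omega
    have hdropLen : (buf.toList.drop (buf.toList.length - (d + 1))).length = d + 1 := by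
      rw [List.length_drop]; omega
    have hA : (PySem.Str.startswith tag (PySem.Str.slice (PySem.Str.slice buf (some ((buf.toList.length : Int) - ((tag.toList.length : Int) - 1))) none) (some ((tag.toList.length - 1 - (d + 1) : Nat) : Int)) none) = true)
        ↔ buf.toList.drop (buf.toList.length - (d + 1)) = tag.toList.take (d + 1) := by
      rw [condA_iff, toList_slice_from _ _ (by positivity), Int.toNat_natCast, hdrop2, hdropLen]
    have hB : (PySem.Str.endswith buf (PySem.Str.slice tag none (some (Nat.cast (d + 1) : Int))) = true)
        ↔ buf.toList.drop (buf.toList.length - (d + 1)) = tag.toList.take (d + 1) := by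
      have h2 : ((Nat.cast (d + 1) : Int)).toNat = d + 1 := by omega
      rw [PySem.Str.endswith_eq, PySem.Str.toList_slice, PySem.Chars.slice_eq_listSlice,
          PySem.List.slice_to _ (by omega), h2, PySem.Chars.endswith_iff,
          List.suffix_iff_eq_drop, List.length_take, Nat.min_eq_left (by omega)]
      exact eq_comm
    have hB0 : ¬ (Nat.cast (d + 1) : Int) ≤ 0 := by omega
    by_cases hP : buf.toList.drop (buf.toList.length - (d + 1)) = tag.toList.take (d + 1)
    · rw [if_pos (hA.mpr hP), flushB_keep, if_neg hB0, if_pos (hB.mpr hP)]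
      have harg : (buf.toList.length : Int) - ((tag.toList.length : Int) - 1) + ((tag.toList.length - 1 - (d + 1) : Nat) : Int)
          = (buf.toList.length : Int) - (Nat.cast (d + 1) : Int) := by omega
      have hsecond : PySem.Str.slice (PySem.Str.slice buf (some ((buf.toList.length : Int) - ((tag.toList.length : Int) - 1))) none) (some ((tag.toList.length - 1 - (d + 1) : Nat) : Int)) none
          = PySem.Str.slice buf (some ((buf.toList.length : Int) - (Nat.cast (d + 1) : Int))) none := by
        apply str_ext
        rw [toList_slice_from _ _ (by positivity), Int.toNat_natCast, hdrop2,
            toList_slice_from _ _ (by omega)]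
        congr 1
        omega
      rw [harg, hsecond]
    · rw [if_neg (by rw [hA]; exact hP), flushB_keep, if_neg hB0,
          if_neg (by rw [hB]; exact hP)]
      have hstep : ((tag.toList.length - 1 - (d + 1) : Nat) : Int) + 1 = ((tag.toList.length - 1 - d : Nat) : Int) := by omega
      have hk : (Nat.cast (d + 1) : Int) - 1 = ((d : Nat) : Int) := by omega
      rw [hstep, hk]
      exact ih (by omega)

-- A reduced to flushB_keep (A's value splits at the largest still-viable suffix length)
set_option maxHeartbeats 2000000 in
theorem A_eq_keep (buf tag : String) :
    flush_safe_py buf tag =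
      (PySem.Str.slice buf none (some ((buf.toList.length : Int) - flushB_keep buf tag (buf.toList.length : Int) (min (buf.toList.length : Int) ((tag.toList.length : Int) - 1)))),
       PySem.Str.slice buf (some ((buf.toList.length : Int) - flushB_keep buf tag (buf.toList.length : Int) (min (buf.toList.length : Int) ((tag.toList.length : Int) - 1)))) none) := by
  unfold flush_safe_py
  simp only [PySem.Str.len_eq]
  by_cases hshort : (buf.toList.length : Int) ≤ (tag.toList.length : Int) - 1
  · rw [if_pos hshort]
    have hmin : min (buf.toList.length : Int) ((tag.toList.length : Int) - 1) = (buf.toList.length : Int) := by omega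
    rw [hmin]
    have h := short_loop buf tag (by omega) buf.toList.length (le_refl _)
    rw [Nat.sub_self] at h
    simpa using h
  · rw [if_neg hshort]
    by_cases hm0 : tag.toList.length = 0
    · have hmin : min (buf.toList.length : Int) ((tag.toList.length : Int) - 1) = (tag.toList.length : Int) - 1 := by omega
      rw [hmin, keep_nonpos buf tag _ _ (by omega), sub_zero, slice_to_full, slice_from_full]
      have htail : (PySem.Str.slice buf (some ((buf.toList.length : Int) - ((tag.toList.length : Int) - 1))) none).toList = [] := by
        rw [toList_slice_from _ _ (by omega)]
        apply List.drop_eq_nil_of_le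
        omega
      rw [htail]
      simp only [List.length_nil, Nat.cast_zero]
      rw [PySem.List.pyRange_one_eq_nil (le_refl (0 : Int))]
      simp only [flushA_tail]
    · have hm1 : 1 ≤ tag.toList.length := by omega
      have hmn : tag.toList.length ≤ buf.toList.length := by omega
      have htaillen : (PySem.Str.slice buf (some ((buf.toList.length : Int) - ((tag.toList.length : Int) - 1))) none).toList.length = tag.toList.length - 1 := by
        rw [toList_slice_from _ _ (by omega), List.length_drop]
        omega
      rw [htaillen]
      have hmin : min (buf.toList.length : Int) ((tag.toList.length : Int) - 1) = ((tag.toList.length - 1 : Nat) : Int) := by omega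
      rw [hmin]
      have h := long_loop buf tag hm1 hmn (tag.toList.length - 1) (le_refl _)
      rw [Nat.sub_self] at h
      simpa using h

-- ===== B-side lemmas =====

theorem suffix_append_singleton {α : Type} (a p : List α) (x c : α) :
    a ++ [x] <:+ p ++ [c] ↔ a <:+ p ∧ x = c := by
  have h : (a ++ [x] <:+ p ++ [c]) ↔ (x :: a.reverse <+: c :: p.reverse) := by
    rw [← List.reverse_prefix]
    simp
  rw [h, List.cons_prefix_cons, List.reverse_prefix, and_comm]

theorem endswith_take_iff (buf tag : String) (r : Int) (hr : 0 ≤ r) :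
    PySem.Str.endswith buf (PySem.Str.slice tag none (some r)) = true ↔
      tag.toList.take r.toNat <:+ buf.toList := by
  rw [PySem.Str.endswith_eq, PySem.Str.toList_slice, PySem.Chars.slice_eq_listSlice,
      PySem.List.slice_to _ hr, PySem.Chars.endswith_iff]

theorem keep_spec (buf tag : String) (n k0 : Int) :
    0 ≤ flushB_keep buf tag n k0 ∧ flushB_keep buf tag n k0 ≤ max k0 0 ∧
      tag.toList.take (flushB_keep buf tag n k0).toNat <:+ buf.toList := by
  suffices h : ∀ (j : Nat) (k : Int), k.toNat ≤ j →
      0 ≤ flushB_keep buf tag n k ∧ flushB_keep buf tag n k ≤ max k 0 ∧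
        tag.toList.take (flushB_keep buf tag n k).toNat <:+ buf.toList by
    exact h k0.toNat k0 le_rfl
  intro j
  induction j with
  | zero =>
    intro k hj
    rw [keep_nonpos _ _ _ _ (by omega)]
    exact ⟨le_refl 0, by omega, by simp⟩
  | succ j ih =>
    intro k hj
    by_cases hk : k ≤ 0
    · rw [keep_nonpos _ _ _ _ hk]
      exact ⟨le_refl 0, by omega, by simp⟩
    · by_cases hend : PySem.Str.endswith buf (PySem.Str.slice tag none (some k)) = true
      · rw [flushB_keep, if_neg hk, if_pos hend]
        exact ⟨by omega, by omega, (endswith_take_iff buf tag k (by omega)).mp hend⟩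
      · rw [flushB_keep, if_neg hk, if_neg hend]
        obtain ⟨h1, h2, h3⟩ := ih (k - 1) (by omega)
        exact ⟨h1, by omega, h3⟩

theorem keep_max (buf tag : String) (n k0 : Int) (l : Int) (_h0 : 0 ≤ l) (hk : l ≤ k0)
    (hs : tag.toList.take l.toNat <:+ buf.toList) : l ≤ flushB_keep buf tag n k0 := by
  suffices h : ∀ (j : Nat) (k : Int), k.toNat ≤ j → l ≤ k → l ≤ flushB_keep buf tag n k by
    exact h k0.toNat k0 le_rfl hk
  intro j
  induction j with
  | zero =>
    intro k hj hlk
    rw [keep_nonpos _ _ _ _ (by omega)]; omega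
  | succ j ih =>
    intro k hj hlk
    by_cases hle : k ≤ 0
    · rw [keep_nonpos _ _ _ _ hle]; omega
    · by_cases hend : PySem.Str.endswith buf (PySem.Str.slice tag none (some k)) = true
      · rw [flushB_keep, if_neg hle, if_pos hend]; exact hlk
      · rw [flushB_keep, if_neg hle, if_neg hend]
        apply ih (k - 1) (by omega)
        rcases lt_or_eq_of_le hlk with h | h
        · omega
        · exfalso
          exact hend ((endswith_take_iff buf tag k (by omega)).mpr (h ▸ hs))

-- invariant of B's pass: lens holds exactly the viable suffix lengths of the processed prefix
theorem lens_mem (tag : String) (p : List Char) (l : Int) :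
    l ∈ p.foldl (flushB_step tag (tag.toList.length : Int)) [0] ↔
      (0 ≤ l ∧ l ≤ max ((tag.toList.length : Int) - 1) 0 ∧ tag.toList.take l.toNat <:+ p) := by
  induction p using List.reverseRecOn generalizing l with
  | nil =>
    simp only [List.foldl_nil, List.mem_singleton]
    constructor
    · rintro rfl
      exact ⟨le_refl 0, le_max_right _ _, by simp⟩
    · rintro ⟨h0, hm, hs⟩
      have h1 : tag.toList.take l.toNat = [] := List.suffix_nil.mp hs
      rcases List.take_eq_nil_iff.mp h1 with h | h
      · omega
      · rw [h] at hm
        simp only [List.length_nil, Nat.cast_zero] at hm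
        omega
  | append_singleton p c ih =>
    rw [List.foldl_append, List.foldl_cons, List.foldl_nil]
    simp only [flushB_step, List.mem_append, List.mem_map, List.mem_filter, List.mem_singleton,
      Bool.and_eq_true, decide_eq_true_eq]
    constructor
    · rintro (⟨a, ⟨ha, hlt, hget⟩, rfl⟩ | rfl)
      · obtain ⟨ha0, ham, hasuf⟩ := (ih a).mp ha
        have haN : a.toNat < tag.toList.length := by omega
        rw [PySem.Str.pyGet?_eq, PySem.Chars.pyGet?_eq_listPyGet?,
            PySem.List.pyGet?_of_nonneg _ ha0] at hget
        have hgetE : tag.toList[a.toNat] = c := by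
          have := List.getElem?_eq_getElem haN
          rw [this] at hget
          exact Option.some_inj.mp hget
        have htake : tag.toList.take (a + 1).toNat = tag.toList.take a.toNat ++ [c] := by
          have : (a + 1).toNat = a.toNat + 1 := by omega
          rw [this, List.take_add_one, List.getElem?_eq_getElem haN, hgetE]
          rfl
        refine ⟨by omega, by omega, ?_⟩
        rw [htake]
        exact (suffix_append_singleton _ _ _ _).mpr ⟨hasuf, rfl⟩
      · exact ⟨le_refl 0, le_max_right _ _, by simp⟩
    · rintro ⟨h0, hm, hs⟩
      by_cases hl : l = 0
      · right; exact hl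
      · left
        have hl1 : 1 ≤ l := by omega
        have hlm : l ≤ (tag.toList.length : Int) - 1 := by omega
        obtain ⟨j, hj⟩ : ∃ j : Nat, l.toNat = j + 1 := ⟨l.toNat - 1, by omega⟩
        have hjN : j < tag.toList.length := by omega
        have htake : tag.toList.take l.toNat = tag.toList.take j ++ [tag.toList[j]] := by
          rw [hj, List.take_add_one, List.getElem?_eq_getElem hjN]
          rfl
        rw [htake] at hs
        obtain ⟨hsuf, hc⟩ := (suffix_append_singleton _ _ _ _).mp hs
        refine ⟨l - 1, ⟨(ih (l - 1)).mpr ⟨by omega, by omega, ?_⟩, by omega, ?_⟩, by omega⟩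
        · have hln : (l - 1).toNat = j := by omega
          rw [hln]; exact hsuf
        · rw [PySem.Str.pyGet?_eq, PySem.Chars.pyGet?_eq_listPyGet?,
              PySem.List.pyGet?_of_nonneg _ (by omega : (0:Int) ≤ l - 1)]
          have hln : (l - 1).toNat = j := by omega
          rw [hln, List.getElem?_eq_getElem hjN, hc]

-- ===== VERDICT (by name: the statement is the Claim_ definition above) =====
set_option maxHeartbeats 2000000 in
theorem flush_safe_py_spec : Claim_equal_flush_safe_py := by
  intro buf tag _
  unfold Spec_flush_safe_py
  rw [A_eq_keep]
  unfold flush_safe_py_alt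
  simp only [PySem.Str.len_eq]
  set K := flushB_keep buf tag (buf.toList.length : Int) (min (buf.toList.length : Int) ((tag.toList.length : Int) - 1)) with hK
  set lens := buf.toList.foldl (flushB_step tag (tag.toList.length : Int)) [0] with hlens
  have h0mem : (0 : Int) ∈ lens := by
    rw [hlens, lens_mem]
    exact ⟨le_refl 0, le_max_right _ _, by simp⟩
  obtain ⟨hK0, hKb, hKs⟩ := keep_spec buf tag (buf.toList.length : Int) (min (buf.toList.length : Int) ((tag.toList.length : Int) - 1))
  cases h : PySem.List.max? lens (fun x => x) with
  | none =>
    exfalso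
    rw [PySem.List.max?_eq_none_iff] at h
    rw [h] at h0mem
    exact List.not_mem_nil h0mem
  | some v =>
    have hv_mem := PySem.List.max?_mem h
    have hv_max := PySem.List.max?_isMax h
    obtain ⟨hv0, hvm, hvs⟩ := (lens_mem tag buf.toList v).mp hv_mem
    have hvn : v ≤ (buf.toList.length : Int) := by
      have hlen := List.IsSuffix.length_le hvs
      rw [List.length_take] at hlen
      omega
    have hvK : v ≤ K := by
      by_cases hm0 : tag.toList.length = 0
      · have hv : v = 0 := by rw [hm0] at hvm; simp at hvm; omega
        rw [hv]; exact hK0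
      · exact keep_max buf tag _ _ v hv0 (by omega) hvs
    have hKv : K ≤ v := by
      have hKmem : K ∈ lens := by
        rw [hlens, lens_mem]
        exact ⟨hK0, by omega, hKs⟩
      exact hv_max K hKmem
    have hvKeq : v = K := le_antisymm hvK hKv
    rw [hvKeq]
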